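-- pv_equiv track=rewrite | github.com/anvitha-24/INF-502 | code_1.py | calculate_max_contiguous_chain
-- ===== SOURCE A (Python) =====
-- def calculate_max_contiguous_chain(sequence1, sequence2):
--     max_contiguous_chain = 0
--     current_contiguous_chain = 0
--
--     for char1, char2 in zip(sequence1, sequence2):
--         if char1 == char2 and char1 != '-':
--             current_contiguous_chain += 1
--             max_contiguous_chain = max(max_contiguous_chain, current_contiguous_chain)
--         else:
--             current_contiguous_chain = 0
--
--     return max_contiguous_chain
-- ===== SOURCE B (Python) =====
-- def calculate_max_contiguous_chain(sequence1, sequence2):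
--     # build a match mask, run-length-encode it, then take the longest True run
--     mask = [c1 == c2 and c1 != '-' for c1, c2 in zip(sequence1, sequence2)]
--     runs = []
--     for b in mask:
--         if runs and runs[-1][0] == b:
--             runs[-1] = (b, runs[-1][1] + 1)
--         else:
--             runs.append((b, 1))
--     best = 0
--     for key, length in runs:
--         if key:
--             best = max(best, length)
--     return best
-- ===== Notes on version B (the rewrite author's own statement) =====
-- stated objective: alternative
-- what changed: B builds a boolean match mask, run-length-encodes it, and takes the maximum length among True runs, instead of A's single running counter with inline reset and max update.
import Mathlib
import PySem

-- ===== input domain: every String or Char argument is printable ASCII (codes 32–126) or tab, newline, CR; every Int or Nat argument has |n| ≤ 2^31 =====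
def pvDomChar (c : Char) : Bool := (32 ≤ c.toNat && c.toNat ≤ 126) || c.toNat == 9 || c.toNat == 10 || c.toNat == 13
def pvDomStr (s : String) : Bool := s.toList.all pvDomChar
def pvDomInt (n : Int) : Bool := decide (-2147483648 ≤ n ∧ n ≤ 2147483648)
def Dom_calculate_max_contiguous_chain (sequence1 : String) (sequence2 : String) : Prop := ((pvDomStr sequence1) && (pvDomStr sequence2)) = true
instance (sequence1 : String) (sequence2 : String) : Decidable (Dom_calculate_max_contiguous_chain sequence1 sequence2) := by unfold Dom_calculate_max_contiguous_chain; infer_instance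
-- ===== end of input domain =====

-- B replaces A's running counter with a mask → run-length-encode → max-of-True-runs decomposition (alternative structure, same cost).

-- ===== PORT A =====
-- literal port: fold over the zipped characters carrying (max_chain, current_chain)
def calculate_max_contiguous_chain (sequence1 : String) (sequence2 : String) : Int :=
  (List.foldl
    (fun (st : Int × Int) (p : Char × Char) =>
      if p.1 = p.2 ∧ p.1 ≠ '-' then (max st.1 (st.2 + 1), st.2 + 1) else (st.1, 0))
    (0, 0) (List.zip sequence1.toList sequence2.toList)).1

-- ===== PORT B =====
-- B's run-length encoder: the Python list appends at the end, so the foldl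
-- accumulator is kept in reverse (newest run at the head) and reversed afterwards.
def pvRleStep (runs : List (Bool × Int)) (b : Bool) : List (Bool × Int) :=
  match runs with
  | (b', n) :: rest => if b' = b then (b, n + 1) :: rest else (b, 1) :: (b', n) :: rest
  | [] => [(b, 1)]

def calculate_max_contiguous_chain_alt (sequence1 : String) (sequence2 : String) : Int :=
  let mask := (List.zip sequence1.toList sequence2.toList).map
    (fun p => decide (p.1 = p.2 ∧ p.1 ≠ '-'))
  let runs := (mask.foldl pvRleStep []).reverse
  runs.foldl (fun (best : Int) (p : Bool × Int) => if p.1 then max best p.2 else best) 0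

-- ===== PRECONDITION & SPEC =====
def Spec_calculate_max_contiguous_chain (sequence1 : String) (sequence2 : String) (out : Int) : Prop := out = calculate_max_contiguous_chain_alt sequence1 sequence2
instance (sequence1 : String) (sequence2 : String) (out : Int) : Decidable (Spec_calculate_max_contiguous_chain sequence1 sequence2 out) := by unfold Spec_calculate_max_contiguous_chain; infer_instance

-- ===== CLAIM (what is proved, stated in full; the proofs are below) =====
def Claim_equal_calculate_max_contiguous_chain : Prop := ∀ (sequence1 : String) (sequence2 : String), Dom_calculate_max_contiguous_chain sequence1 sequence2 → Spec_calculate_max_contiguous_chain sequence1 sequence2 (calculate_max_contiguous_chain sequence1 sequence2)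

-- ===== LEMMAS AND PROOFS =====

-- order-independent value of the "max over True runs" fold
def pvM (rs : List (Bool × Int)) : Int :=
  rs.foldr (fun (p : Bool × Int) (a : Int) => if p.1 then max a p.2 else a) 0

lemma pvM_rev (rs : List (Bool × Int)) :
    rs.reverse.foldl (fun (best : Int) (p : Bool × Int) => if p.1 then max best p.2 else best) 0
      = pvM rs := by
  rw [List.foldl_reverse]; rfl

-- current run length as seen by A's counter
def pvCur (rs : List (Bool × Int)) : Int :=
  match rs with
  | (true, n) :: _ => n
  | _ => 0

lemma pv_main (mask : List Bool) (rs : List (Bool × Int)) (mx : Int)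
    (h : pvM rs = mx) :
    (List.foldl (fun (st : Int × Int) (b : Bool) =>
        if b then (max st.1 (st.2 + 1), st.2 + 1) else (st.1, 0)) (mx, pvCur rs) mask).1
      = pvM (mask.foldl pvRleStep rs) := by
  induction mask generalizing rs mx with
  | nil => simpa using h.symm
  | cons b t ih =>
    simp only [List.foldl_cons]
    cases b with
    | false =>
      have hM : pvM (pvRleStep rs false) = pvM rs := by
        cases rs with
        | nil => simp [pvRleStep, pvM]
        | cons hd tl =>
          obtain ⟨b', n⟩ := hd
          cases b' <;> simp [pvRleStep, pvM]
      have hC : pvCur (pvRleStep rs false) = 0 := by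
        cases rs with
        | nil => simp [pvRleStep, pvCur]
        | cons hd tl =>
          obtain ⟨b', n⟩ := hd
          cases b' <;> simp [pvRleStep, pvCur]
      simpa [hC] using ih (pvRleStep rs false) mx (by rw [hM, h])
    | true =>
      have hM : pvM (pvRleStep rs true) = max mx (pvCur rs + 1) := by
        cases rs with
        | nil => simp [pvRleStep, pvM, pvCur] at h ⊢; omega
        | cons hd tl =>
          obtain ⟨b', n⟩ := hd
          cases b' with
          | false => simp [pvRleStep, pvM, pvCur] at h ⊢; omega
          | true => simp [pvRleStep, pvM, pvCur] at h ⊢; omega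
      have hC : pvCur (pvRleStep rs true) = pvCur rs + 1 := by
        cases rs with
        | nil => simp [pvRleStep, pvCur]
        | cons hd tl =>
          obtain ⟨b', n⟩ := hd
          cases b' <;> simp [pvRleStep, pvCur]
      simpa [hC] using ih (pvRleStep rs true) (max mx (pvCur rs + 1)) hM

-- ===== VERDICT (by name: the statement is the Claim_ definition above) =====
theorem calculate_max_contiguous_chain_spec : Claim_equal_calculate_max_contiguous_chain := by
  intro s1 s2 _
  unfold Spec_calculate_max_contiguous_chain calculate_max_contiguous_chain
    calculate_max_contiguous_chain_alt
  rw [pvM_rev]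
  have := pv_main ((List.zip s1.toList s2.toList).map
      (fun p => decide (p.1 = p.2 ∧ p.1 ≠ '-'))) [] 0 (by rfl)
  rw [List.foldl_map] at this
  simp only [pvCur] at this
  rw [← this]
  congr 1
  apply List.foldl_ext
  intro st p _
  by_cases hp : p.1 = p.2 ∧ p.1 ≠ '-' <;> simp [hp]
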